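-- pv_equiv track=rewrite | github.com/pinktasha1/PZ_Manakova-2024-25 | PZ_6/pz_6.2.py | k_monotony
-- ===== SOURCE A (Python) =====
-- def k_monotony(a):
--     k = 1  # счётчик кол-ва промежутков монотонности
--     monotony = None #true будет возрастающим промежутком, а false - убывающим
--     for i in range(1, len(a)):
--         if a[i] > a[i - 1]:  # проверяю элемент на возрастание
--             if monotony == False:  # если промежуток был убывающим, то +1 к счётчику
--                 k += 1
--             monotony = True
--         elif a[i] < a[i - 1]:  # проверяю элемент на убывание
--             if monotony == True:
--                 k += 1
--             monotony = False
--     return k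
-- ===== SOURCE B (Python) =====
-- def k_monotony(a):
--     # pass 1: record the direction sign of every strictly changing adjacent pair
--     signs = []
--     for i in range(1, len(a)):
--         if a[i] > a[i - 1]:
--             signs.append(1)
--         elif a[i] < a[i - 1]:
--             signs.append(-1)
--     # pass 2: a new monotone run starts exactly where the direction flips
--     k = 0
--     for j in range(1, len(signs)):
--         if signs[j] != signs[j - 1]:
--             k += 1
--     return 1 + k
-- ===== Notes on version B (the rewrite author's own statement) =====
-- stated objective: alternative
-- what changed: Replaces the single stateful tri-valued scan (counter plus None/True/False direction flag) by two separate passes: first build the filtered list of difference signs of strictly changing adjacent pairs, then count adjacent sign transitions and return 1 plus that count.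
import Mathlib
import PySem

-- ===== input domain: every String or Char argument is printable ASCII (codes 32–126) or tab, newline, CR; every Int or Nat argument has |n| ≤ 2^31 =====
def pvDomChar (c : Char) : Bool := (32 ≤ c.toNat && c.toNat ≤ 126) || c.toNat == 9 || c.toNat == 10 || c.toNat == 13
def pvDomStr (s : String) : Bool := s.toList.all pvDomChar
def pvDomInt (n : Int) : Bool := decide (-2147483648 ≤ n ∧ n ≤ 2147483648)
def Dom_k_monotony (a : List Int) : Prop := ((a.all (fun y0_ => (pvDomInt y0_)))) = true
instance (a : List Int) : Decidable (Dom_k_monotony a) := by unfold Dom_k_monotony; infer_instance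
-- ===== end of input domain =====

-- B replaces A's single stateful tri-valued scan by two passes: build the list of
-- difference signs of strictly changing adjacent pairs, then count sign transitions.

-- ===== PORT A =====
-- indices i and i-1 lie in [0, len a) for i ∈ range(1, len a), so pyGetD is exact here
def k_monotony (a : List Int) : Int :=
  ((PySem.List.pyRange 1 (a.length : Int) 1).foldl
    (fun (st : Int × Option Bool) i =>
      if PySem.List.pyGetD a i 0 > PySem.List.pyGetD a (i - 1) 0 then
        (if st.2 = some false then st.1 + 1 else st.1, some true)
      else if PySem.List.pyGetD a i 0 < PySem.List.pyGetD a (i - 1) 0 then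
        (if st.2 = some true then st.1 + 1 else st.1, some false)
      else st)
    (1, none)).1

-- ===== PORT B =====
def k_monotony_alt (a : List Int) : Int :=
  let signs : List Int := (PySem.List.pyRange 1 (a.length : Int) 1).foldl
    (fun (l : List Int) i =>
      if PySem.List.pyGetD a i 0 > PySem.List.pyGetD a (i - 1) 0 then l ++ [1]
      else if PySem.List.pyGetD a i 0 < PySem.List.pyGetD a (i - 1) 0 then l ++ [-1]
      else l) []
  let k : Int := (PySem.List.pyRange 1 (signs.length : Int) 1).foldl
    (fun (k : Int) j =>
      if PySem.List.pyGetD signs j 0 ≠ PySem.List.pyGetD signs (j - 1) 0 then k + 1 else k) 0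
  1 + k

-- ===== PRECONDITION & SPEC =====
def Spec_k_monotony (a : List Int) (out : Int) : Prop := out = k_monotony_alt a
instance (a : List Int) (out : Int) : Decidable (Spec_k_monotony a out) := by unfold Spec_k_monotony; infer_instance

-- ===== CLAIM (what is proved, stated in full; the proofs are below) =====
def Claim_equal_k_monotony : Prop := ∀ (a : List Int), Dom_k_monotony a → Spec_k_monotony a (k_monotony a)

-- ===== LEMMAS AND PROOFS =====

-- an index fold over range(1, len a) reading a[i-1], a[i] is a fold over adjacent pairs
lemma pyRange_map_pair (a : List Int) :
    (PySem.List.pyRange 1 (a.length : Int) 1).map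
      (fun j => (PySem.List.pyGetD a (j - 1) 0, PySem.List.pyGetD a j 0)) = a.zip a.tail := by
  rw [PySem.List.pyRange_one, List.map_map]
  apply List.ext_getElem
  · simp [List.length_zip]
  · intro k h1 h2
    simp only [List.length_map, List.length_range] at h1
    have hk : k < a.length - 1 := by omega
    simp only [List.getElem_map, List.getElem_range, Function.comp_apply, List.getElem_zip,
      List.getElem_tail]
    have e1 : ((1 : Int) + k - 1) = ((k : Nat) : Int) := by omega
    have e2 : ((1 : Int) + k) = (((k + 1 : Nat)) : Int) := by push_cast; ring
    rw [e1, e2, PySem.List.pyGetD_eq_getElem a (i := ((k : Nat) : Int)) 0 (by omega) (by omega),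
        PySem.List.pyGetD_eq_getElem a (i := (((k + 1 : Nat)) : Int)) 0 (by omega) (by push_cast; omega)]
    simp

lemma fold_idx_pairs {σ : Type} (a : List Int) (f : σ → Int → Int → σ) (s : σ) :
    (PySem.List.pyRange 1 (a.length : Int) 1).foldl
      (fun st j => f st (PySem.List.pyGetD a (j - 1) 0) (PySem.List.pyGetD a j 0)) s
    = (a.zip a.tail).foldl (fun st p => f st p.1 p.2) s := by
  rw [← pyRange_map_pair a, List.foldl_map]

-- the sign of a strictly changing pair; equal pairs contribute nothing
def sgn2 (q : Int × Int) : Option Int :=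
  if q.2 > q.1 then some 1 else if q.2 < q.1 then some (-1) else none

def stepA (st : Int × Option Bool) (q : Int × Int) : Int × Option Bool :=
  if q.2 > q.1 then (if st.2 = some false then st.1 + 1 else st.1, some true)
  else if q.2 < q.1 then (if st.2 = some true then st.1 + 1 else st.1, some false)
  else st

def stepS (st : Int × Option Bool) (s : Int) : Int × Option Bool :=
  if s = 1 then (if st.2 = some false then st.1 + 1 else st.1, some true)
  else (if st.2 = some true then st.1 + 1 else st.1, some false)

def gcnt (k : Int) (q : Int × Int) : Int := if q.2 ≠ q.1 then k + 1 else k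

lemma foldl_signs (p : List (Int × Int)) (acc : List Int) :
    p.foldl (fun l q => if q.2 > q.1 then l ++ [1]
      else if q.2 < q.1 then l ++ [-1] else l) acc
    = acc ++ p.filterMap sgn2 := by
  induction p generalizing acc with
  | nil => simp
  | cons q p ih =>
    simp only [List.foldl_cons, List.filterMap_cons, ih, sgn2]
    split_ifs <;> simp

lemma foldA_filter (p : List (Int × Int)) (st : Int × Option Bool) :
    p.foldl stepA st = (p.filterMap sgn2).foldl stepS st := by
  induction p generalizing st with
  | nil => rfl
  | cons q p ih =>
    rcases lt_trichotomy q.1 q.2 with h | h | h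
    · have hA : stepA st q = (if st.2 = some false then st.1 + 1 else st.1, some true) := by
        simp [stepA, h]
      have hG : sgn2 q = some 1 := by simp [sgn2, h]
      have hS : stepS st 1 = (if st.2 = some false then st.1 + 1 else st.1, some true) := by
        simp [stepS]
      simp only [List.foldl_cons, List.filterMap_cons, hA, hG, hS, ih]
    · have hA : stepA st q = st := by simp [stepA, h]
      have hG : sgn2 q = none := by simp [sgn2, h]
      simp only [List.foldl_cons, List.filterMap_cons, hA, hG, ih]
    · have hA : stepA st q = (if st.2 = some true then st.1 + 1 else st.1, some false) := by
        simp [stepA, h, not_lt.mpr (le_of_lt h)]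
      have hG : sgn2 q = some (-1) := by simp [sgn2, h, not_lt.mpr (le_of_lt h)]
      have hS : stepS st (-1) = (if st.2 = some true then st.1 + 1 else st.1, some false) := by
        norm_num [stepS]
      simp only [List.foldl_cons, List.filterMap_cons, hA, hG, hS, ih]

lemma mem_filterMap_sgn2 (p : List (Int × Int)) (s : Int) (h : s ∈ p.filterMap sgn2) :
    s = 1 ∨ s = -1 := by
  rw [List.mem_filterMap] at h
  obtain ⟨q, _, hq⟩ := h
  unfold sgn2 at hq
  split_ifs at hq <;> simp_all

lemma gcnt_shift (l : List (Int × Int)) (k : Int) :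
    l.foldl gcnt k = k + l.foldl gcnt 0 := by
  induction l generalizing k with
  | nil => simp
  | cons q l ih =>
    simp only [List.foldl_cons, gcnt]
    split_ifs
    · rw [ih (k + 1), ih (0 + 1)]; ring
    · rw [ih]

lemma stepS_count (rest : List Int) (hr : ∀ s ∈ rest, s = 1 ∨ s = -1)
    (prev : Int) (hp : prev = 1 ∨ prev = -1) (k : Int) :
    (rest.foldl stepS (k, if prev = 1 then some true else some false)).1
      = k + ((prev :: rest).zip rest).foldl gcnt 0 := by
  induction rest generalizing prev k with
  | nil => simp
  | cons s rest ih =>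
    have hs : s = 1 ∨ s = -1 := hr s (by simp)
    have hstep : stepS (k, if prev = 1 then some true else some false) s
        = (k + (if s ≠ prev then 1 else 0), if s = 1 then some true else some false) := by
      unfold stepS
      rcases hs with rfl | rfl <;> rcases hp with rfl | rfl <;> norm_num
    have hr' : ∀ t ∈ rest, t = 1 ∨ t = -1 := fun t ht => hr t (by simp [ht])
    simp only [List.foldl_cons, hstep, List.zip_cons_cons]
    rw [ih hr' s hs, gcnt_shift (((s :: rest).zip rest)) (gcnt 0 (prev, s))]
    unfold gcnt
    split_ifs <;> ring

lemma final_count (S : List Int) (hall : ∀ t ∈ S, t = 1 ∨ t = -1) :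
    (S.foldl stepS (1, none)).1 = 1 + (S.zip S.tail).foldl gcnt 0 := by
  match S with
  | [] => norm_num
  | s :: rest =>
    have hsv : s = 1 ∨ s = -1 := hall s (by simp)
    have h0 : stepS (1, none) s = (1, if s = 1 then some true else some false) := by
      rcases hsv with rfl | rfl <;> simp [stepS]
    simp only [List.foldl_cons, List.tail_cons, h0]
    rw [stepS_count rest (fun t ht => hall t (by simp [ht])) s hsv 1]

lemma main_eq (a : List Int) : k_monotony a = k_monotony_alt a := by
  unfold k_monotony
  simp only [k_monotony_alt]
  rw [fold_idx_pairs a (fun st x y =>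
      if y > x then (if st.2 = some false then st.1 + 1 else st.1, some true)
      else if y < x then (if st.2 = some true then st.1 + 1 else st.1, some false)
      else st) (1, none),
    fold_idx_pairs a (fun l x y =>
      if y > x then l ++ [1] else if y < x then l ++ [-1] else l) []]
  have hA : (fun (st : Int × Option Bool) (p : Int × Int) =>
      if p.2 > p.1 then (if st.2 = some false then st.1 + 1 else st.1, some true)
      else if p.2 < p.1 then (if st.2 = some true then st.1 + 1 else st.1, some false)
      else st) = stepA := rfl
  rw [hA, foldA_filter, foldl_signs, List.nil_append,
    fold_idx_pairs (List.filterMap sgn2 (a.zip a.tail))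
      (fun k x y => if y ≠ x then k + 1 else k) 0]
  have hg : (fun (k : Int) (p : Int × Int) => if p.2 ≠ p.1 then k + 1 else k) = gcnt := rfl
  rw [hg]
  exact final_count _ (mem_filterMap_sgn2 _)

-- ===== VERDICT (by name: the statement is the Claim_ definition above) =====
theorem k_monotony_spec : Claim_equal_k_monotony := by
  intro a _
  unfold Spec_k_monotony
  exact main_eq a
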